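-- pv_equiv track=rewrite | github.com/jayanth922/ubuntu | backend/rag_service/query_transformer.py | _simplify_technical_terms
-- ===== SOURCE A (Python) =====
-- def _simplify_technical_terms(query: str) -> str:
--     """Simplify technical terms for broader matching"""
--     simplified = query.lower()
--
--     # Technical term simplifications
--     simplifications = {
--         "authentication": "login",
--         "configuration": "setup",
--         "repository": "repo",
--         "dependencies": "requirements",
--         "executable": "program",
--         "terminal": "command line",
--         "directory": "folder",
--         "compilation": "build"
--     }
--
--     for technical, simple in simplifications.items():
--         if technical in simplified:
--             simplified = simplified.replace(technical, f"{technical} {simple}")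
--
--     return simplified
-- ===== SOURCE B (Python) =====
-- import re
--
-- _SIMPLIFICATIONS = {
--     "authentication": "login",
--     "configuration": "setup",
--     "repository": "repo",
--     "dependencies": "requirements",
--     "executable": "program",
--     "terminal": "command line",
--     "directory": "folder",
--     "compilation": "build",
-- }
--
-- _PATTERN = re.compile("|".join(re.escape(k) for k in _SIMPLIFICATIONS))
--
--
-- def _simplify_technical_terms(query: str) -> str:
--     """Simplify technical terms for broader matching (single-pass table-driven scan)."""
--     return _PATTERN.sub(lambda m: f"{m.group(0)} {_SIMPLIFICATIONS[m.group(0)]}", query.lower())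
-- ===== Notes on version B (the rewrite author's own statement) =====
-- stated objective: idiomatic
-- what changed: A runs eight sequential guarded str.replace passes over the string; B compiles the mapping into one literal-alternation regex and rewrites every term in a single left-to-right scan via re.sub.
import Mathlib
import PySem

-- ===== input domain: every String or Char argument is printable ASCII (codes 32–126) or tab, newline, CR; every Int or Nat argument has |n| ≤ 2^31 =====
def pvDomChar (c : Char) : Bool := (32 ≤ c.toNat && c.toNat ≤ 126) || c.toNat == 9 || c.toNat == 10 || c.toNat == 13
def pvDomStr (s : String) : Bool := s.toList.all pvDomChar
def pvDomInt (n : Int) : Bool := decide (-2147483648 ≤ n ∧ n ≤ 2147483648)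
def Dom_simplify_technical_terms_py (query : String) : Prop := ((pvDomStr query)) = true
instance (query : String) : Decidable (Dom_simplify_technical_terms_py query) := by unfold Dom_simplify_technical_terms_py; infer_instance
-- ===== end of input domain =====

-- B replaces A's eight sequential guarded str.replace passes by one table-driven left-to-right
-- scan (a compiled literal-alternation regex in Source B); same return value, no mutation involved.

-- ===== PORT A =====
-- the dict literal, in insertion order
def pvSimplifications : List (String × String) :=
  [("authentication", "login"),
   ("configuration", "setup"),
   ("repository", "repo"),
   ("dependencies", "requirements"),
   ("executable", "program"),
   ("terminal", "command line"),
   ("directory", "folder"),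
   ("compilation", "build")]

-- literal port of A: lower, then one guarded replace pass per dict item
def simplify_technical_terms_py (query : String) : String :=
  let simplified := PySem.Str.lower query
  pvSimplifications.foldl
    (fun simplified p =>
      if PySem.Str.isIn p.1 simplified then
        PySem.Str.replace simplified p.1 (p.1 ++ " " ++ p.2)
      else simplified)
    simplified

-- ===== PORT B =====
-- the same table, as char lists (key, value)
def pvPairs : List (List Char × List Char) :=
  [("authentication".toList, "login".toList),
   ("configuration".toList, "setup".toList),
   ("repository".toList, "repo".toList),
   ("dependencies".toList, "requirements".toList),
   ("executable".toList, "program".toList),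
   ("terminal".toList, "command line".toList),
   ("directory".toList, "folder".toList),
   ("compilation".toList, "build".toList)]

-- Source B's `pattern.sub(lambda m: f"{m.group(0)} {mapping[m.group(0)]}", ...)` with a
-- literal-alternation pattern, ported as the leftmost, first-matching-alternative scan:
-- exact for a regex that is an '|'-alternation of escaped literals.
def pvScan (ps : List (List Char × List Char)) : List Char → List Char
  | [] => []
  | c :: cs =>
    match ps.find? (fun p => p.1.isPrefixOf (c :: cs)) with
    | some p => p.1 ++ ' ' :: p.2 ++ pvScan ps (cs.drop (p.1.length - 1))
    | none => c :: pvScan ps cs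
  termination_by s => s.length
  decreasing_by all_goals (simp only [List.length_drop, List.length_cons]; omega)

def simplify_technical_terms_py_alt (query : String) : String :=
  String.ofList (pvScan pvPairs (PySem.Chars.lower query.toList))

-- ===== PRECONDITION & SPEC =====
def Spec_simplify_technical_terms_py (query : String) (out : String) : Prop := out = simplify_technical_terms_py_alt query
instance (query : String) (out : String) : Decidable (Spec_simplify_technical_terms_py query out) := by unfold Spec_simplify_technical_terms_py; infer_instance

-- ===== CLAIM (what is proved, stated in full; the proofs are below) =====
def Claim_equal_simplify_technical_terms_py : Prop := ∀ (query : String), Dom_simplify_technical_terms_py query → Spec_simplify_technical_terms_py query (simplify_technical_terms_py query)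

-- ===== LEMMAS AND PROOFS =====

-- plain recursion computing str.replace (for a nonempty pattern)
def pvRep (old nw : List Char) : List Char → List Char
  | [] => []
  | c :: t =>
    if old.isPrefixOf (c :: t) then nw ++ pvRep old nw (t.drop (old.length - 1))
    else c :: pvRep old nw t
  termination_by s => s.length
  decreasing_by all_goals (simp only [List.length_drop, List.length_cons]; omega)

-- "no occurrence of k can start inside p (whatever follows p)"
abbrev pvBlocked (p k : List Char) : Prop :=
  ∀ i < p.length, ¬ (k <+: p.drop i) ∧ ¬ (p.drop i <+: k)

lemma pvRep_go (old nw : List Char) (hold : old ≠ []) :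
    ∀ fuel (l acc : List Char), l.length ≤ fuel →
      PySem.Chars.replace.go old nw fuel l acc = acc.reverse ++ pvRep old nw l := by
  intro fuel
  induction fuel with
  | zero =>
    intro l acc hl
    have : l = [] := by cases l <;> simp_all
    subst this
    simp [PySem.Chars.replace.go, pvRep]
  | succ n ih =>
    intro l acc hl
    cases l with
    | nil => simp [PySem.Chars.replace.go, pvRep]
    | cons c t =>
      by_cases hp : old.isPrefixOf (c :: t) = true
      · rw [show PySem.Chars.replace.go old nw (n+1) (c :: t) acc
            = PySem.Chars.replace.go old nw n (List.drop old.length (c :: t)) (nw.reverse ++ acc) from by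
          simp [PySem.Chars.replace.go, hp]]
        have ho : 1 ≤ old.length := by cases old <;> simp_all
        rw [ih _ _ (by simp only [List.length_drop]; simp at hl ⊢; omega)]
        have hdrop : List.drop old.length (c :: t) = t.drop (old.length - 1) := by
          cases old with
          | nil => simp at hold
          | cons o os => simp
        rw [hdrop]
        rw [show pvRep old nw (c :: t) = nw ++ pvRep old nw (t.drop (old.length - 1)) from by
          rw [pvRep]; simp [hp]]
        simp
      · rw [show PySem.Chars.replace.go old nw (n+1) (c :: t) acc
            = PySem.Chars.replace.go old nw n t (c :: acc) from by
          simp [PySem.Chars.replace.go, hp]]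
        rw [ih _ _ (by simp at hl; omega)]
        rw [show pvRep old nw (c :: t) = c :: pvRep old nw t from by rw [pvRep]; simp [hp]]
        simp

lemma pvReplace_eq_rep (s old nw : List Char) (hold : old ≠ []) :
    PySem.Chars.replace s old nw = pvRep old nw s := by
  rw [PySem.Chars.replace]
  have : old.isEmpty = false := by cases old <;> simp_all
  rw [this]
  simp [pvRep_go old nw hold s.length s [] le_rfl]

lemma pvRep_id_of_not_infix (old nw : List Char) :
    ∀ s, ¬ old <:+: s → pvRep old nw s = s := by
  intro s
  induction s with
  | nil => intro h; rw [pvRep]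
  | cons c t ih =>
    intro h
    rw [List.infix_cons_iff] at h
    push Not at h
    rw [pvRep]
    rw [if_neg (by simpa [List.isPrefixOf_iff_prefix] using h.1)]
    rw [ih h.2]

lemma pvRep_append_blocked (old nw : List Char) :
    ∀ (p : List Char), pvBlocked p old →
    ∀ t, pvRep old nw (p ++ t) = p ++ pvRep old nw t := by
  intro p
  induction p with
  | nil => intro _ t; simp
  | cons c p' ih =>
    intro hb t
    have h0 := hb 0 (by simp)
    simp only [List.drop_zero] at h0
    have hnp : ¬ old <+: (c :: p') ++ t := by
      intro hpre
      rcases List.prefix_or_prefix_of_prefix hpre (List.prefix_append (c :: p') t) with h | h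
      · exact h0.1 h
      · exact h0.2 h
    rw [List.cons_append, pvRep]
    rw [if_neg (by simpa [List.isPrefixOf_iff_prefix] using hnp)]
    rw [ih (fun i hi => by simpa using hb (i+1) (by simpa using Nat.succ_lt_succ hi)) t]
    simp

lemma pvScan_nil : ∀ ps, pvScan ps [] = [] := by intro ps; rw [pvScan]

lemma pvScan_cons_some (ps : List (List Char × List Char)) (c : Char) (cs : List Char)
    (pr : List Char × List Char)
    (h : ps.find? (fun p => p.1.isPrefixOf (c :: cs)) = some pr) :
    pvScan ps (c :: cs) = pr.1 ++ ' ' :: pr.2 ++ pvScan ps (cs.drop (pr.1.length - 1)) := by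
  rw [pvScan, h]

lemma pvScan_cons_none (ps : List (List Char × List Char)) (c : Char) (cs : List Char)
    (h : ps.find? (fun p => p.1.isPrefixOf (c :: cs)) = none) :
    pvScan ps (c :: cs) = c :: pvScan ps cs := by
  rw [pvScan, h]

lemma pvScan_nil_pairs : ∀ s, pvScan [] s = s := by
  intro s
  induction s with
  | nil => rw [pvScan]
  | cons c t ih => rw [pvScan_cons_none [] c t (by simp)]; rw [ih]

lemma pvScan_no_front (ps : List (List Char × List Char)) (k : List Char)
    (H2 : ∀ p ∈ ps, pvBlocked k p.1) :
    ∀ n s u, s.length ≤ n → (∃ i, i < k.length ∧ u = k.drop i) →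
      u <+: pvScan ps s → u <+: s := by
  intro n
  induction n with
  | zero =>
    intro s u hs hu hp
    have : s = [] := by cases s <;> simp_all
    subst this
    rwa [pvScan_nil] at hp
  | succ m ih =>
    intro s u hs hu hp
    obtain ⟨i, hi, rfl⟩ := hu
    have hune : k.drop i ≠ [] := by
      intro h; rw [List.drop_eq_nil_iff] at h; omega
    cases s with
    | nil => rwa [pvScan_nil] at hp
    | cons c cs =>
      cases hfind : ps.find? (fun p => p.1.isPrefixOf (c :: cs)) with
      | some pr =>
        rw [pvScan_cons_some ps c cs pr hfind] at hp
        exfalso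
        have hbl := H2 pr (List.mem_of_find?_eq_some hfind)
        have h2 : pr.1 <+: pr.1 ++ ' ' :: pr.2 ++ pvScan ps (cs.drop (pr.1.length - 1)) :=
          ((List.prefix_append pr.1 (' ' :: pr.2)).trans (List.prefix_append _ _))
        rcases List.prefix_or_prefix_of_prefix hp h2 with h' | h'
        · exact (hbl i hi).2 h'
        · exact (hbl i hi).1 h'
      | none =>
        rw [pvScan_cons_none ps c cs hfind] at hp
        cases hu' : k.drop i with
        | nil => exact absurd hu' hune
        | cons d u' =>
          rw [hu'] at hp
          rw [List.cons_prefix_cons] at hp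
          obtain ⟨rfl, hp2⟩ := hp
          have hu'eq : u' = k.drop (i + 1) := by
            rw [← List.tail_drop, hu']
            rfl
          by_cases hnil : u' = []
          · subst hnil; simp
          · have hi1 : i + 1 < k.length := by
              by_contra hcon
              exact hnil (by rw [hu'eq, List.drop_eq_nil_iff]; omega)
            have := ih cs u' (by simp at hs; omega) ⟨i+1, hi1, hu'eq⟩ hp2
            exact List.cons_prefix_cons.mpr ⟨rfl, this⟩

lemma pvScan_pass (ps : List (List Char × List Char)) (k : List Char)
    (H2 : ∀ p ∈ ps, pvBlocked k p.1) :
    ∀ u, (∃ i, i < k.length ∧ u = k.drop i) ∨ u = [] →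
      ∀ t, pvScan ps (u ++ t) = u ++ pvScan ps t := by
  intro u
  induction u with
  | nil => intro _ t; simp
  | cons d u' ih =>
    intro hu t
    rcases hu with ⟨i, hi, hu⟩ | h
    · have hfind : ps.find? (fun p => p.1.isPrefixOf (d :: u' ++ t)) = none := by
        rw [List.find?_eq_none]
        intro p hp hpre
        rw [List.isPrefixOf_iff_prefix] at hpre
        have hbl := H2 p hp
        have heq : (d :: u') ++ t = k.drop i ++ t := by rw [hu]
        rw [heq] at hpre
        rcases List.prefix_or_prefix_of_prefix hpre (List.prefix_append (k.drop i) t) with h' | h'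
        · exact (hbl i hi).1 h'
        · exact (hbl i hi).2 h'
      rw [List.cons_append, pvScan_cons_none ps d (u' ++ t) hfind]
      have hu' : u' = k.drop (i + 1) := by rw [← List.tail_drop, ← hu]; rfl
      by_cases hnil : u' = []
      · subst hnil; simp
      · have hi1 : i + 1 < k.length := by
          by_contra hcon
          exact hnil (by rw [hu', List.drop_eq_nil_iff]; omega)
        rw [ih (Or.inl ⟨i+1, hi1, hu'⟩) t]
        simp
    · simp at h

lemma pvRep_nil (old nw : List Char) : pvRep old nw [] = [] := by rw [pvRep]

lemma pvRep_pos (k nw : List Char) (hk : k ≠ []) (X : List Char) :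
    pvRep k nw (k ++ X) = nw ++ pvRep k nw X := by
  cases k with
  | nil => exact absurd rfl hk
  | cons d k' =>
    rw [List.cons_append, pvRep]
    rw [if_pos (by rw [List.isPrefixOf_iff_prefix, ← List.cons_append]; exact List.prefix_append _ _)]
    congr 1
    rw [show (d :: k').length - 1 = k'.length from by simp]
    rw [List.drop_left]


lemma pvMain (ps : List (List Char × List Char)) (k v : List Char) (hk : k ≠ [])
    (H1 : ∀ p ∈ ps, pvBlocked (p.1 ++ ' ' :: p.2) k)
    (H2 : ∀ p ∈ ps, pvBlocked k p.1) :
    ∀ n s, s.length ≤ n →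
      pvRep k (k ++ ' ' :: v) (pvScan ps s) = pvScan (ps ++ [(k, v)]) s := by
  have hk0 : 0 < k.length := by cases k <;> simp_all
  intro n
  induction n with
  | zero =>
    intro s hs
    have : s = [] := by cases s <;> simp_all
    subst this
    rw [pvScan_nil, pvScan_nil, pvRep_nil]
  | succ m ih =>
    intro s hs
    cases s with
    | nil => rw [pvScan_nil, pvScan_nil, pvRep_nil]
    | cons c cs =>
      cases hfind : ps.find? (fun p => p.1.isPrefixOf (c :: cs)) with
      | some pr =>
        rw [pvScan_cons_some ps c cs pr hfind]
        rw [pvScan_cons_some (ps ++ [(k, v)]) c cs pr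
          (by rw [List.find?_append, hfind]; rfl)]
        rw [show pr.1 ++ ' ' :: pr.2 ++ pvScan ps (cs.drop (pr.1.length - 1))
            = (pr.1 ++ ' ' :: pr.2) ++ pvScan ps (cs.drop (pr.1.length - 1)) from rfl]
        rw [pvRep_append_blocked k (k ++ ' ' :: v) (pr.1 ++ ' ' :: pr.2)
          (H1 pr (List.mem_of_find?_eq_some hfind)) _]
        rw [ih (cs.drop (pr.1.length - 1)) (by simp at hs ⊢; omega)]
      | none =>
        by_cases hkp : k.isPrefixOf (c :: cs) = true
        · obtain ⟨w, hw⟩ := List.isPrefixOf_iff_prefix.mp hkp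
          have hfull : (ps ++ [(k, v)]).find? (fun p => p.1.isPrefixOf (c :: cs)) = some (k, v) := by
            rw [List.find?_append, hfind]
            simp [hkp]
          rw [pvScan_cons_some (ps ++ [(k, v)]) c cs (k, v) hfull]
          rw [← hw]
          rw [pvScan_pass ps k H2 k (Or.inl ⟨0, hk0, by simp⟩) w]
          rw [pvRep_pos k (k ++ ' ' :: v) hk (pvScan ps w)]
          have hwlen : w.length ≤ m := by
            have := congrArg List.length hw
            simp at this hs
            omega
          rw [ih w hwlen]
          have hwdrop : cs.drop (k.length - 1) = w := by
            cases k with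
            | nil => exact absurd rfl hk
            | cons d k' =>
              rw [List.cons_append, List.cons.injEq] at hw
              rw [← hw.2]
              simp
          rw [hwdrop]
        · have hfull : (ps ++ [(k, v)]).find? (fun p => p.1.isPrefixOf (c :: cs)) = none := by
            rw [List.find?_append, hfind]
            simp [hkp]
          rw [pvScan_cons_none ps c cs hfind, pvScan_cons_none _ c cs hfull]
          have hnof : ¬ k.isPrefixOf (c :: pvScan ps cs) = true := by
            intro hpre
            rw [List.isPrefixOf_iff_prefix] at hpre
            rw [← pvScan_cons_none ps c cs hfind] at hpre
            have := pvScan_no_front ps k H2 (c :: cs).length (c :: cs) k le_rfl ⟨0, hk0, by simp⟩ hpre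
            rw [← List.isPrefixOf_iff_prefix] at this
            exact absurd this (by simpa using hkp)
          rw [pvRep]
          rw [if_neg hnof]
          rw [ih cs (by simp at hs; omega)]

lemma pvStepA (s a b : String) (ha : a.toList ≠ [])
    (hab : (a ++ " " ++ b).toList = a.toList ++ ' ' :: b.toList) :
    (if PySem.Str.isIn a s then PySem.Str.replace s a (a ++ " " ++ b) else s).toList
      = pvRep a.toList (a.toList ++ ' ' :: b.toList) s.toList := by
  by_cases h : PySem.Str.isIn a s = true
  · rw [if_pos h, PySem.Str.toList_replace, hab, pvReplace_eq_rep _ _ _ ha]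
  · rw [if_neg h]
    rw [Bool.not_eq_true] at h
    rw [pvRep_id_of_not_infix a.toList _ s.toList
      (by rw [PySem.Str.isIn_eq] at h; exact (PySem.Chars.isIn_eq_false_iff _ _).mp h)]

-- ===== VERDICT (by name: the statement is the Claim_ definition above) =====
theorem simplify_technical_terms_py_spec : Claim_equal_simplify_technical_terms_py := by
  intro query _
  unfold Spec_simplify_technical_terms_py
  rw [← String.toList_inj]
  simp only [simplify_technical_terms_py, pvSimplifications, List.foldl]
  rw [pvStepA _ "compilation" "build" (by decide) (by decide)]
  rw [pvStepA _ "directory" "folder" (by decide) (by decide)]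
  rw [pvStepA _ "terminal" "command line" (by decide) (by decide)]
  rw [pvStepA _ "executable" "program" (by decide) (by decide)]
  rw [pvStepA _ "dependencies" "requirements" (by decide) (by decide)]
  rw [pvStepA _ "repository" "repo" (by decide) (by decide)]
  rw [pvStepA _ "configuration" "setup" (by decide) (by decide)]
  rw [pvStepA _ "authentication" "login" (by decide) (by decide)]
  simp only [PySem.Str.toList_lower]
  have h1 : pvRep "authentication".toList ("authentication".toList ++ ' ' :: "login".toList) (PySem.Chars.lower query.toList)
      = pvScan [("authentication".toList, "login".toList)] (PySem.Chars.lower query.toList) := by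
    have := pvMain [] "authentication".toList "login".toList (by decide) (by decide) (by decide)
      (PySem.Chars.lower query.toList).length (PySem.Chars.lower query.toList) le_rfl
    rw [pvScan_nil_pairs] at this
    simpa using this
  have h2 : pvRep "configuration".toList ("configuration".toList ++ ' ' :: "setup".toList) (pvScan [("authentication".toList, "login".toList)] (PySem.Chars.lower query.toList))
      = pvScan [("authentication".toList, "login".toList), ("configuration".toList, "setup".toList)] (PySem.Chars.lower query.toList) := by
    have :=    pvMain [("authentication".toList, "login".toList)] "configuration".toList "setup".toList (by decide) (by decide) (by decide)
      (PySem.Chars.lower query.toList).length (PySem.Chars.lower query.toList) le_rfl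
    simpa using this
  have h3 : pvRep "repository".toList ("repository".toList ++ ' ' :: "repo".toList) (pvScan [("authentication".toList, "login".toList), ("configuration".toList, "setup".toList)] (PySem.Chars.lower query.toList))
      = pvScan [("authentication".toList, "login".toList), ("configuration".toList, "setup".toList), ("repository".toList, "repo".toList)] (PySem.Chars.lower query.toList) := by
    have :=    pvMain [("authentication".toList, "login".toList), ("configuration".toList, "setup".toList)] "repository".toList "repo".toList (by decide) (by decide) (by decide)
      (PySem.Chars.lower query.toList).length (PySem.Chars.lower query.toList) le_rfl
    simpa using this
  have h4 : pvRep "dependencies".toList ("dependencies".toList ++ ' ' :: "requirements".toList) (pvScan [("authentication".toList, "login".toList), ("configuration".toList, "setup".toList), ("repository".toList, "repo".toList)] (PySem.Chars.lower query.toList))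
      = pvScan [("authentication".toList, "login".toList), ("configuration".toList, "setup".toList), ("repository".toList, "repo".toList), ("dependencies".toList, "requirements".toList)] (PySem.Chars.lower query.toList) := by
    have :=    pvMain [("authentication".toList, "login".toList), ("configuration".toList, "setup".toList), ("repository".toList, "repo".toList)] "dependencies".toList "requirements".toList (by decide) (by decide) (by decide)
      (PySem.Chars.lower query.toList).length (PySem.Chars.lower query.toList) le_rfl
    simpa using this
  have h5 : pvRep "executable".toList ("executable".toList ++ ' ' :: "program".toList) (pvScan [("authentication".toList, "login".toList), ("configuration".toList, "setup".toList), ("repository".toList, "repo".toList), ("dependencies".toList, "requirements".toList)] (PySem.Chars.lower query.toList))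
      = pvScan [("authentication".toList, "login".toList), ("configuration".toList, "setup".toList), ("repository".toList, "repo".toList), ("dependencies".toList, "requirements".toList), ("executable".toList, "program".toList)] (PySem.Chars.lower query.toList) := by
    have :=    pvMain [("authentication".toList, "login".toList), ("configuration".toList, "setup".toList), ("repository".toList, "repo".toList), ("dependencies".toList, "requirements".toList)] "executable".toList "program".toList (by decide) (by decide) (by decide)
      (PySem.Chars.lower query.toList).length (PySem.Chars.lower query.toList) le_rfl
    simpa using this
  have h6 : pvRep "terminal".toList ("terminal".toList ++ ' ' :: "command line".toList) (pvScan [("authentication".toList, "login".toList), ("configuration".toList, "setup".toList), ("repository".toList, "repo".toList), ("dependencies".toList, "requirements".toList), ("executable".toList, "program".toList)] (PySem.Chars.lower query.toList))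
      = pvScan [("authentication".toList, "login".toList), ("configuration".toList, "setup".toList), ("repository".toList, "repo".toList), ("dependencies".toList, "requirements".toList), ("executable".toList, "program".toList), ("terminal".toList, "command line".toList)] (PySem.Chars.lower query.toList) := by
    have :=    pvMain [("authentication".toList, "login".toList), ("configuration".toList, "setup".toList), ("repository".toList, "repo".toList), ("dependencies".toList, "requirements".toList), ("executable".toList, "program".toList)] "terminal".toList "command line".toList (by decide) (by decide) (by decide)
      (PySem.Chars.lower query.toList).length (PySem.Chars.lower query.toList) le_rfl
    simpa using this
  have h7 : pvRep "directory".toList ("directory".toList ++ ' ' :: "folder".toList) (pvScan [("authentication".toList, "login".toList), ("configuration".toList, "setup".toList), ("repository".toList, "repo".toList), ("dependencies".toList, "requirements".toList), ("executable".toList, "program".toList), ("terminal".toList, "command line".toList)] (PySem.Chars.lower query.toList))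
      = pvScan [("authentication".toList, "login".toList), ("configuration".toList, "setup".toList), ("repository".toList, "repo".toList), ("dependencies".toList, "requirements".toList), ("executable".toList, "program".toList), ("terminal".toList, "command line".toList), ("directory".toList, "folder".toList)] (PySem.Chars.lower query.toList) := by
    have :=    pvMain [("authentication".toList, "login".toList), ("configuration".toList, "setup".toList), ("repository".toList, "repo".toList), ("dependencies".toList, "requirements".toList), ("executable".toList, "program".toList), ("terminal".toList, "command line".toList)] "directory".toList "folder".toList (by decide) (by decide) (by decide)
      (PySem.Chars.lower query.toList).length (PySem.Chars.lower query.toList) le_rfl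
    simpa using this
  have h8 : pvRep "compilation".toList ("compilation".toList ++ ' ' :: "build".toList) (pvScan [("authentication".toList, "login".toList), ("configuration".toList, "setup".toList), ("repository".toList, "repo".toList), ("dependencies".toList, "requirements".toList), ("executable".toList, "program".toList), ("terminal".toList, "command line".toList), ("directory".toList, "folder".toList)] (PySem.Chars.lower query.toList))
      = pvScan [("authentication".toList, "login".toList), ("configuration".toList, "setup".toList), ("repository".toList, "repo".toList), ("dependencies".toList, "requirements".toList), ("executable".toList, "program".toList), ("terminal".toList, "command line".toList), ("directory".toList, "folder".toList), ("compilation".toList, "build".toList)] (PySem.Chars.lower query.toList) := by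
    have :=    pvMain [("authentication".toList, "login".toList), ("configuration".toList, "setup".toList), ("repository".toList, "repo".toList), ("dependencies".toList, "requirements".toList), ("executable".toList, "program".toList), ("terminal".toList, "command line".toList), ("directory".toList, "folder".toList)] "compilation".toList "build".toList (by decide) (by decide) (by decide)
      (PySem.Chars.lower query.toList).length (PySem.Chars.lower query.toList) le_rfl
    simpa using this
  rw [h1, h2, h3, h4, h5, h6, h7, h8]
  simp only [simplify_technical_terms_py_alt, String.toList_ofList, pvPairs]
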